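-- pv_equiv track=rewrite | github.com/jordan-carson/Data_Structures_Algos | CodingSites/pramp/data_structures/BracketMatch.py | bracket_match
-- ===== SOURCE A (Python) =====
-- def bracket_match(text):
--     stack = []
--     for bracket in text:
--         if bracket == "(":
--             stack.append(bracket)
--         elif bracket == ")":
--             if len(stack) != 0 and stack[-1] == "(":  # matching
--                 stack.pop(-1)
--             else:
--                 stack.append(bracket)
--     return len(stack)
-- ===== SOURCE B (Python) =====
-- def bracket_match(text):
--     # Arithmetic characterization: map brackets to +1/-1, unmatched count =
--     # final balance minus twice the lowest prefix balance (<= 0).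
--     vals = [1 if ch == "(" else -1 if ch == ")" else 0 for ch in text]
--     total = sum(vals)
--     lowest = 0
--     running = 0
--     for v in vals:
--         running += v
--         if running < lowest:
--             lowest = running
--     return total - 2 * lowest
-- ===== Notes on version B (the rewrite author's own statement) =====
-- stated objective: alternative
-- what changed: Replaces the stack simulation with an arithmetic prefix-sum characterization: brackets map to +1/-1, and the unmatched count equals the final balance minus twice the minimum prefix balance; no matching test or container is maintained.
import Mathlib
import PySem

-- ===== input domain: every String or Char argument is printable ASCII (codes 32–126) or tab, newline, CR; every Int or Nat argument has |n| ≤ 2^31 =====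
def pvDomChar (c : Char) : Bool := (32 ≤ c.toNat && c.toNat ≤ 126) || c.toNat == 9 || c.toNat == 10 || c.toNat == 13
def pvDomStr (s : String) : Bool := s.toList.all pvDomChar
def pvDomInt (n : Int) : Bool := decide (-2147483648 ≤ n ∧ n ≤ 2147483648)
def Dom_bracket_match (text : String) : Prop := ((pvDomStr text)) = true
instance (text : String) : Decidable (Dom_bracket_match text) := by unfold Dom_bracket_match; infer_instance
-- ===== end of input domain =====

-- ===== PORT A =====
-- B drops A's stack simulation for an arithmetic prefix-balance formula; same return value.
def pvStepA (stack : List Char) (ch : Char) : List Char :=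
  if ch = '(' then stack ++ ['(']
  else if ch = ')' then
    if stack.length ≠ 0 ∧ stack.getLast? = some '(' then stack.dropLast
    else stack ++ [')']
  else stack

def bracket_match (text : String) : Int :=
  ((text.toList.foldl pvStepA []).length : Int)

-- ===== PORT B =====
def pvVal (ch : Char) : Int := if ch = '(' then 1 else if ch = ')' then -1 else 0

-- state = (running, lowest); Python: running += v; if running < lowest: lowest = running
def pvStepB (p : Int × Int) (v : Int) : Int × Int :=
  (p.1 + v, if p.1 + v < p.2 then p.1 + v else p.2)

def bracket_match_alt (text : String) : Int :=
  let vals := text.toList.map pvVal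
  let total := vals.foldl (· + ·) 0
  let p := vals.foldl pvStepB (0, 0)
  total - 2 * p.2

-- ===== PRECONDITION & SPEC =====
def Spec_bracket_match (text : String) (out : Int) : Prop := out = bracket_match_alt text
instance (text : String) (out : Int) : Decidable (Spec_bracket_match text out) := by unfold Spec_bracket_match; infer_instance

-- ===== CLAIM (what is proved, stated in full; the proofs are below) =====
def Claim_equal_bracket_match : Prop := ∀ (text : String), Dom_bracket_match text → Spec_bracket_match text (bracket_match text)

-- ===== LEMMAS AND PROOFS =====

-- The running component of B's scan is a plain left fold of addition.
theorem pv_fst_foldB (l : List Int) : ∀ (r low : Int),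
    (l.foldl pvStepB (r, low)).1 = l.foldl (· + ·) r := by
  induction l with
  | nil => intro r low; rfl
  | cons v tl ih => intro r low; simp only [List.foldl_cons, pvStepB]; exact ih _ _

-- Invariant: A's stack is always ')'^c ++ '('^o, and B's state there is (o - c, -c).
theorem pv_invariant (l : List Char) : ∀ (o c : Nat),
    ∃ o' c' : Nat,
      l.foldl pvStepA (List.replicate c ')' ++ List.replicate o '(')
        = List.replicate c' ')' ++ List.replicate o' '(' ∧
      (l.map pvVal).foldl pvStepB ((o : Int) - c, -(c : Int))
        = ((o' : Int) - c', -(c' : Int)) := by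
  induction l with
  | nil => intro o c; exact ⟨o, c, rfl, rfl⟩
  | cons ch tl ih =>
    intro o c
    simp only [List.foldl_cons, List.map_cons]
    by_cases h1 : ch = '('
    · have ha : pvStepA (List.replicate c ')' ++ List.replicate o '(') ch
          = List.replicate c ')' ++ List.replicate (o + 1) '(' := by
        simp [pvStepA, h1, List.replicate_succ' (n := o)]
      have hb : pvStepB ((o : Int) - c, -(c : Int)) (pvVal ch)
          = (((o + 1 : Nat) : Int) - c, -(c : Int)) := by
        simp [pvStepB, pvVal, h1]
        constructor
        · ring
        · intro h; omega
      rw [ha, hb]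
      exact ih (o + 1) c
    · by_cases h2 : ch = ')'
      · cases o with
        | zero =>
          have ha : pvStepA (List.replicate c ')' ++ List.replicate 0 '(') ch
              = List.replicate (c + 1) ')' ++ List.replicate 0 '(' := by
            cases c with
            | zero => simp [pvStepA, h2]
            | succ k =>
              simp [pvStepA, h2, List.replicate_succ' (n := k + 1),
                List.replicate_succ' (n := k)]
          have hb : pvStepB (((0 : Nat) : Int) - c, -(c : Int)) (pvVal ch)
              = (((0 : Nat) : Int) - ((c + 1 : Nat) : Int), -((c + 1 : Nat) : Int)) := by
            simp [pvStepB, pvVal, h2]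
            omega
          rw [ha, hb]
          exact ih 0 (c + 1)
        | succ k =>
          have ha : pvStepA (List.replicate c ')' ++ List.replicate (k + 1) '(') ch
              = List.replicate c ')' ++ List.replicate k '(' := by
            simp [pvStepA, h2, List.replicate_succ' (n := k), ← List.append_assoc]
          have hb : pvStepB (((k + 1 : Nat) : Int) - c, -(c : Int)) (pvVal ch)
              = ((k : Int) - c, -(c : Int)) := by
            simp [pvStepB, pvVal, h2]
            omega
          rw [ha, hb]
          exact ih k c
      · have ha : pvStepA (List.replicate c ')' ++ List.replicate o '(') ch
            = List.replicate c ')' ++ List.replicate o '(' := by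
          simp [pvStepA, h1, h2]
        have hb : pvStepB ((o : Int) - c, -(c : Int)) (pvVal ch)
            = ((o : Int) - c, -(c : Int)) := by
          simp [pvStepB, pvVal, h1, h2]
        rw [ha, hb]
        exact ih o c

-- ===== VERDICT (by name: the statement is the Claim_ definition above) =====
theorem bracket_match_spec : Claim_equal_bracket_match := by
  intro text _
  unfold Spec_bracket_match bracket_match bracket_match_alt
  obtain ⟨o', c', ha, hb⟩ := pv_invariant text.toList 0 0
  have h0 : (((0 : Nat) : Int) - ((0 : Nat) : Int), -((0 : Nat) : Int)) = ((0 : Int), (0 : Int)) := by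
    norm_num
  rw [h0] at hb
  have htot : (text.toList.map pvVal).foldl (· + ·) 0
      = (o' : Int) - c' := by
    have := pv_fst_foldB (text.toList.map pvVal) 0 0
    rw [hb] at this
    simpa using this.symm
  have ha' : text.toList.foldl pvStepA []
      = List.replicate c' ')' ++ List.replicate o' '(' := by simpa using ha
  simp only [hb, htot, ha']
  simp
  ring
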